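-- pv_equiv track=rewrite | github.com/fuhailin/show-me-python-code | leetcode/魔法币.py | magiccoin
-- ===== SOURCE A (Python) =====
-- def magiccoin(n):
--     """
--     :type n: int
--     :rtype :string
--     """
--     temp=[]
--     if n<=0:
--         return 0
--     while(n>0):
--         if (n%2)==0:
--             temp.append(2)
--             n=(n-2)//2
--         else:
--             temp.append(1)
--             n=(n-1)//2
--     res=''
--     for i in range(1,len(temp)+1):
--         res=res+str(temp[len(temp)-i])
--     return res
-- ===== SOURCE B (Python) =====
-- def magiccoin(n):
--     """
--     :type n: int
--     :rtype :string
--     """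
--     if n <= 0:
--         return 0
--     def _digits(m):
--         if m == 0:
--             return ''
--         d = 2 if m % 2 == 0 else 1
--         return _digits((m - d) // 2) + str(d)
--     return _digits(n)
-- ===== Notes on version B (the rewrite author's own statement) =====
-- stated objective: simpler
-- what changed: Replaces the append-to-list loop plus a separate index-reversal string loop with a single recursion on the shrinking number that builds the digit string most-significant-first, eliminating the temp list and the second loop.
-- outside the precondition, e.g. on magiccoin(0): A returns 0, B returns 0
import Mathlib
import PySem

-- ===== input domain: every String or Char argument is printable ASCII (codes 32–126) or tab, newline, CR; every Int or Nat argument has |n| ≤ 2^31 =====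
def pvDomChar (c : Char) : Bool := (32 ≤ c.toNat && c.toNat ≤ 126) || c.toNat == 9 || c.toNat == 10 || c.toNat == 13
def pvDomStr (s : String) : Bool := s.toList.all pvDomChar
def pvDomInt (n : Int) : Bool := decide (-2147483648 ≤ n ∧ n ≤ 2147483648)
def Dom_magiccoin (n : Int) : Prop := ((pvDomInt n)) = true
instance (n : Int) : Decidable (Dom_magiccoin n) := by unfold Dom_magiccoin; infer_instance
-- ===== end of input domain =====

-- B replaces A's list-accumulate loop plus index-reversal string loop with one recursion
-- building the digit string most-significant-first (objective: simpler).

-- ===== PORT A =====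
-- the while loop: appends 2 or 1 to temp and shrinks n
def magicLoop (n : Int) (temp : List Int) : List Int :=
  if h : n > 0 then
    if PySem.Int.mod n 2 == 0 then
      magicLoop (PySem.Int.floordiv (n - 2) 2) (temp ++ [2])
    else
      magicLoop (PySem.Int.floordiv (n - 1) 2) (temp ++ [1])
  else temp
termination_by n.toNat
decreasing_by
  · rw [PySem.Int.floordiv_eq_ediv_of_pos (by omega)]; omega
  · rw [PySem.Int.floordiv_eq_ediv_of_pos (by omega)]; omega

def magiccoin (n : Int) : String :=
  if n ≤ 0 then ""  -- Python returns the int 0 here (not a String); excluded by Pre_magiccoin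
  else
    let temp := magicLoop n []
    -- for i in range(1, len(temp)+1): res = res + str(temp[len(temp)-i])
    (PySem.List.pyRange 1 ((temp.length : Int) + 1) 1).foldl
      (fun res i => res ++ PySem.Int.toStr (PySem.List.pyGetD temp ((temp.length : Int) - i) 0)) ""

-- ===== PORT B =====
-- _digits: base case m == 0 yields ""; the m < 0 branch of the guard is never
-- reached from magiccoin_alt (the guard only makes the recursion total).
def digitsB (m : Int) : String :=
  if _h : m ≤ 0 then ""
  else
    let d : Int := if PySem.Int.mod m 2 == 0 then 2 else 1
    digitsB (PySem.Int.floordiv (m - d) 2) ++ PySem.Int.toStr d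
termination_by m.toNat
decreasing_by
  rw [PySem.Int.floordiv_eq_ediv_of_pos (by omega)]
  split at *
  · rename_i hmod
    have := PySem.Int.mod_eq_zero_iff_dvd m 2
    omega
  · omega

def magiccoin_alt (n : Int) : String :=
  if n ≤ 0 then ""  -- Python returns the int 0 here (not a String); excluded by Pre_magiccoin
  else digitsB n

-- ===== PRECONDITION & SPEC =====
-- Pre_ excludes n ≤ 0, where Python A (and B) return the int 0 — not a value of the declared string type.
def Pre_magiccoin (n : Int) : Prop := 0 < n
instance (n : Int) : Decidable (Pre_magiccoin n) := by unfold Pre_magiccoin; infer_instance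
def pvWitness_magiccoin : Int := (7)

def Spec_magiccoin (n : Int) (out : String) : Prop := out = magiccoin_alt n
instance (n : Int) (out : String) : Decidable (Spec_magiccoin n out) := by unfold Spec_magiccoin; infer_instance

-- ===== CLAIM (what is proved, stated in full; the proofs are below) =====
def Claim_equal_magiccoin : Prop := ∀ (n : Int), Dom_magiccoin n → Pre_magiccoin n → Spec_magiccoin n (magiccoin n)

-- ===== LEMMAS AND PROOFS =====

-- fold rendering a digit list left-to-right
def renderR (l : List Int) : String := l.foldl (fun r x => r ++ PySem.Int.toStr x) ""

theorem renderR_append (l : List Int) (d : Int) :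
    renderR (l ++ [d]) = renderR l ++ PySem.Int.toStr d := by
  simp [renderR, List.foldl_append]

theorem magicLoop_acc_aux : ∀ (k : Nat) (n : Int), n.toNat ≤ k →
    ∀ acc, magicLoop n acc = acc ++ magicLoop n [] := by
  intro k
  induction k with
  | zero =>
    intro n hn acc
    conv_lhs => rw [magicLoop]
    conv_rhs => rw [magicLoop]
    simp [show ¬ n > 0 by omega]
  | succ k ih =>
    intro n hn acc
    by_cases hpos : n > 0
    · conv_lhs => rw [magicLoop]
      conv_rhs => rw [magicLoop]
      simp only [dif_pos hpos, List.nil_append]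
      by_cases hm : PySem.Int.mod n 2 == 0
      · simp only [if_pos hm]
        have hb : (PySem.Int.floordiv (n - 2) 2).toNat ≤ k := by
          rw [PySem.Int.floordiv_eq_ediv_of_pos (by omega)]; omega
        rw [ih _ hb (acc ++ [2]), ih _ hb [2]]
        simp
      · simp only [if_neg hm]
        have hb : (PySem.Int.floordiv (n - 1) 2).toNat ≤ k := by
          rw [PySem.Int.floordiv_eq_ediv_of_pos (by omega)]; omega
        rw [ih _ hb (acc ++ [1]), ih _ hb [1]]
        simp
    · conv_lhs => rw [magicLoop]
      conv_rhs => rw [magicLoop]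
      simp [hpos]

theorem magicLoop_acc (n : Int) (acc : List Int) :
    magicLoop n acc = acc ++ magicLoop n [] :=
  magicLoop_acc_aux n.toNat n le_rfl acc

theorem map_range_rev (temp : List Int) :
    (List.range temp.length).map
      (fun k : Nat => PySem.List.pyGetD temp ((temp.length : Int) - (1 + (k : Int))) 0)
      = temp.reverse := by
  apply List.ext_getElem
  · simp
  · intro j hj1 hj2
    simp only [List.getElem_map, List.getElem_range, List.getElem_reverse]
    simp only [List.length_map, List.length_range] at hj1
    rw [show ((temp.length : Int) - (1 + (j : Int))) = ((temp.length - 1 - j : Nat) : Int) by omega]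
    rw [PySem.List.pyGetD_natCast]
    rw [List.getD_eq_getElem _ _ (by omega)]

theorem render_eq (temp : List Int) :
    (PySem.List.pyRange 1 ((temp.length : Int) + 1) 1).foldl
      (fun res i => res ++ PySem.Int.toStr (PySem.List.pyGetD temp ((temp.length : Int) - i) 0)) ""
      = renderR temp.reverse := by
  rw [PySem.List.pyRange_one, ← map_range_rev temp]
  simp only [renderR, List.foldl_map]
  rw [show ((temp.length : Int) + 1 - 1).toNat = temp.length by omega]

theorem main_aux : ∀ (k : Nat) (n : Int), n.toNat ≤ k →
    renderR (magicLoop n []).reverse = digitsB n := by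
  intro k
  induction k with
  | zero =>
    intro n hn
    rw [magicLoop, digitsB]
    simp [show ¬ n > 0 by omega, show n ≤ 0 by omega, renderR]
  | succ k ih =>
    intro n hn
    by_cases hpos : n > 0
    · rw [magicLoop, digitsB]
      simp only [dif_pos hpos, dif_neg (show ¬ n ≤ 0 by omega)]
      by_cases hm : PySem.Int.mod n 2 == 0
      · simp only [if_pos hm]
        rw [magicLoop_acc, List.reverse_append]
        simp only [List.nil_append, List.reverse_cons, List.reverse_nil, List.nil_append]
        rw [renderR_append]
        rw [ih _ (by rw [PySem.Int.floordiv_eq_ediv_of_pos (by omega)]; omega)]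
      · simp only [if_neg hm]
        rw [magicLoop_acc, List.reverse_append]
        simp only [List.nil_append, List.reverse_cons, List.reverse_nil, List.nil_append]
        rw [renderR_append]
        rw [ih _ (by rw [PySem.Int.floordiv_eq_ediv_of_pos (by omega)]; omega)]
    · rw [magicLoop, digitsB]
      simp [hpos, show n ≤ 0 by omega, renderR]

theorem main_eq (n : Int) : renderR (magicLoop n []).reverse = digitsB n :=
  main_aux n.toNat n le_rfl

-- ===== VERDICT (by name: the statement is the Claim_ definition above) =====
theorem magiccoin_spec : Claim_equal_magiccoin := by
  intro n _ hpre
  have hn : 0 < n := hpre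
  unfold Spec_magiccoin magiccoin magiccoin_alt
  rw [if_neg (by omega), if_neg (by omega)]
  simpa [render_eq] using main_eq n
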